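-- pv_equiv track=rewrite | github.com/adambernier/code_wars | sudoku_validator.py | valid_section
-- ===== SOURCE A (Python) =====
-- import collections as co
--
-- def valid_section(section):
--   left_sq = co.defaultdict(int)
--   mid_sq = co.defaultdict(int)
--   right_sq = co.defaultdict(int)
--   for row in section:
--     for idx,three in enumerate(row):
--       if idx == 0:
--         for num in three:
--           left_sq[num] += 1
--       elif idx == 1:
--         for num in three:
--           mid_sq[num] += 1
--       else:
--         for num in three:
--           right_sq[num] += 1
--   return left_sq, mid_sq, right_sq
-- ===== SOURCE B (Python) =====
-- import collections as co
--
-- def _count_groups(groups):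
--     d = co.defaultdict(int)
--     for g in groups:
--         for num in g:
--             d[num] += 1
--     return d
--
-- def valid_section(section):
--     left_sq = _count_groups(row[0] for row in section if len(row) > 0)
--     mid_sq = _count_groups(row[1] for row in section if len(row) > 1)
--     right_sq = _count_groups(g for row in section for g in row[2:])
--     return left_sq, mid_sq, right_sq
-- ===== Notes on version B (the rewrite author's own statement) =====
-- stated objective: alternative
-- what changed: Replaced A's single pass that enumerates each row and dispatches on the index into three dicts by three independent counting passes, one per column block (row[0], row[1], flattened row[2:]).
import Mathlib
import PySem

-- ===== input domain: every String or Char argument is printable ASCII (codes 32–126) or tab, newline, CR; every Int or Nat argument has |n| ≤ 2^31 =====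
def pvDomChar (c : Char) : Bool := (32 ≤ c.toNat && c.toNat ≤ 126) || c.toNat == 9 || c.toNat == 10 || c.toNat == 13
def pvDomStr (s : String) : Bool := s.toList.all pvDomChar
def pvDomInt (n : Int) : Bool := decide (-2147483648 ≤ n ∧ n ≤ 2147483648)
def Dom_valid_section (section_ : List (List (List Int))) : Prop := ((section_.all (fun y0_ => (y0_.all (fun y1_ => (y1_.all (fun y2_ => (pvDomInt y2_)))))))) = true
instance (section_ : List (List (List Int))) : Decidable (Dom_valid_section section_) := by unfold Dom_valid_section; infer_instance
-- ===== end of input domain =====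

-- B replaces A's one enumerate-and-dispatch pass by three independent counting passes (alternative decomposition, same cost).

-- ===== PORT A =====
-- defaultdict(int) increment: d[num] += 1
def pvIncr (d : PySem.Dict Int Int) (n : Int) : PySem.Dict Int Int := d.modify n 0 (· + 1)
-- inner 'for num in three: d[num] += 1'
def pvCnt (d : PySem.Dict Int Int) (g : List Int) : PySem.Dict Int Int := g.foldl pvIncr d
-- body of the 'for idx,three in enumerate(row)' loop
def pvStep (st : PySem.Dict Int Int × PySem.Dict Int Int × PySem.Dict Int Int)
    (p : Int × List Int) : PySem.Dict Int Int × PySem.Dict Int Int × PySem.Dict Int Int :=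
  if p.1 == 0 then (pvCnt st.1 p.2, st.2.1, st.2.2)
  else if p.1 == 1 then (st.1, pvCnt st.2.1 p.2, st.2.2)
  else (st.1, st.2.1, pvCnt st.2.2 p.2)

def valid_section (section_ : List (List (List Int))) : (List (Int × Int)) × (List (Int × Int)) × (List (Int × Int)) :=
  let st := section_.foldl (fun st row => (PySem.List.enumerate row 0).foldl pvStep st)
    (PySem.Dict.empty, PySem.Dict.empty, PySem.Dict.empty)
  (st.1.items, st.2.1.items, st.2.2.items)

-- ===== PORT B =====
-- _count_groups: count every number of every group into one defaultdict(int)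
def pvCountGroups (groups : List (List Int)) : PySem.Dict Int Int :=
  groups.foldl (fun d g => g.foldl (fun d num => d.modify num 0 (· + 1)) d) PySem.Dict.empty

def valid_section_alt (section_ : List (List (List Int))) : (List (Int × Int)) × (List (Int × Int)) × (List (Int × Int)) :=
  let left_sq := pvCountGroups ((section_.filter (fun row => decide (0 < row.length))).map (fun row => row.getD 0 []))
  let mid_sq := pvCountGroups ((section_.filter (fun row => decide (1 < row.length))).map (fun row => row.getD 1 []))
  let right_sq := pvCountGroups (section_.flatMap (fun row => PySem.List.slice row (some 2) none))
  (left_sq.items, mid_sq.items, right_sq.items)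

-- ===== PRECONDITION & SPEC =====
def Spec_valid_section (section_ : List (List (List Int))) (out : (List (Int × Int)) × (List (Int × Int)) × (List (Int × Int))) : Prop := out = valid_section_alt section_
instance (section_ : List (List (List Int))) (out : (List (Int × Int)) × (List (Int × Int)) × (List (Int × Int))) : Decidable (Spec_valid_section section_ out) := by unfold Spec_valid_section; infer_instance

-- ===== CLAIM (what is proved, stated in full; the proofs are below) =====
def Claim_equal_valid_section : Prop := ∀ (section_ : List (List (List Int))), Dom_valid_section section_ → Spec_valid_section section_ (valid_section section_)

-- ===== LEMMAS AND PROOFS =====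

-- from index 2 on, every enumerate step takes the else branch
lemma pv_tailStep (rest : List (List Int)) : ∀ (s : Int), 2 ≤ s →
    ∀ st, (PySem.List.enumerate rest s).foldl pvStep st = (st.1, st.2.1, rest.foldl pvCnt st.2.2) := by
  induction rest with
  | nil => intro s hs st; rfl
  | cons g t ih =>
    intro s hs st
    have h0 : (s == 0) = false := by rw [beq_eq_false_iff_ne]; omega
    have h1 : (s == 1) = false := by rw [beq_eq_false_iff_ne]; omega
    rw [PySem.List.enumerate_cons, List.foldl_cons, List.foldl_cons]
    simp only [pvStep, h0, h1, Bool.false_eq_true, if_false]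
    exact ih (s + 1) (by omega) _

-- one row of A's loop, split by column block
lemma pv_rowStep (row : List (List Int)) (st : PySem.Dict Int Int × PySem.Dict Int Int × PySem.Dict Int Int) :
    (PySem.List.enumerate row 0).foldl pvStep st =
      (pvCnt st.1 (row.take 1).flatten, pvCnt st.2.1 ((row.drop 1).take 1).flatten,
        (row.drop 2).foldl pvCnt st.2.2) := by
  match row with
  | [] => rfl
  | [a] =>
    simp [PySem.List.enumerate_cons, PySem.List.enumerate_nil, pvStep, pvCnt]
  | a :: b :: rest =>
    rw [PySem.List.enumerate_cons, PySem.List.enumerate_cons, List.foldl_cons, List.foldl_cons,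
      pv_tailStep rest (0 + 1 + 1) (by omega)]
    simp [pvStep]

-- A's whole fold, componentwise
lemma pv_foldA (sec : List (List (List Int))) :
    ∀ st : PySem.Dict Int Int × PySem.Dict Int Int × PySem.Dict Int Int,
    sec.foldl (fun st row => (PySem.List.enumerate row 0).foldl pvStep st) st =
      (sec.foldl (fun d r => pvCnt d (r.take 1).flatten) st.1,
       sec.foldl (fun d r => pvCnt d ((r.drop 1).take 1).flatten) st.2.1,
       sec.foldl (fun d r => (r.drop 2).foldl pvCnt d) st.2.2) := by
  induction sec with
  | nil => intro st; rfl
  | cons r t ih => intro st; rw [List.foldl_cons, pv_rowStep, ih]; rfl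

lemma pv_countGroups_eq (gs : List (List Int)) (d : PySem.Dict Int Int) :
    gs.foldl (fun d g => g.foldl (fun d num => d.modify num 0 (· + 1)) d) d = gs.foldl pvCnt d := rfl

lemma pv_leftEq (sec : List (List (List Int))) : ∀ d,
    (((sec.filter (fun r => decide (0 < r.length))).map (fun r => r.getD 0 []))).foldl pvCnt d =
      sec.foldl (fun d r => pvCnt d (r.take 1).flatten) d := by
  induction sec with
  | nil => intro d; rfl
  | cons r t ih =>
    intro d
    match r with
    | [] => simpa using ih d
    | a :: rt => simpa using ih (pvCnt d a)

lemma pv_midEq (sec : List (List (List Int))) : ∀ d,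
    (((sec.filter (fun r => decide (1 < r.length))).map (fun r => r.getD 1 []))).foldl pvCnt d =
      sec.foldl (fun d r => pvCnt d ((r.drop 1).take 1).flatten) d := by
  induction sec with
  | nil => intro d; rfl
  | cons r t ih =>
    intro d
    match r with
    | [] => simpa using ih d
    | [a] => simpa using ih d
    | a :: b :: rt => simpa using ih (pvCnt d b)

lemma pv_rightEq (sec : List (List (List Int))) : ∀ d,
    (sec.flatMap (fun r => r.drop 2)).foldl pvCnt d =
      sec.foldl (fun d r => (r.drop 2).foldl pvCnt d) d := by
  induction sec with
  | nil => intro d; rfl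
  | cons r t ih =>
    intro d
    rw [List.flatMap_cons, List.foldl_append, List.foldl_cons, ih]

lemma pv_slice_two (r : List (List Int)) : PySem.List.slice r (some 2) none = r.drop 2 := by
  rw [PySem.List.slice_from r (by norm_num)]; rfl

-- ===== VERDICT (by name: the statement is the Claim_ definition above) =====
theorem valid_section_spec : Claim_equal_valid_section := by
  intro sec _
  unfold Spec_valid_section valid_section valid_section_alt pvCountGroups
  rw [pv_foldA]
  simp only [pv_countGroups_eq, pv_leftEq, pv_midEq]
  have : (fun (r : List (List Int)) => PySem.List.slice r (some 2) none) = (fun r => r.drop 2) := by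
    funext r; exact pv_slice_two r
  rw [this, pv_rightEq]
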